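-- pv_equiv track=rewrite | github.com/raphaelyuster/almost-k-union-closed | polynomial.py | rho
-- ===== SOURCE A (Python) =====
-- def fact(j):
--     r = 1
--     for i in range(j):
--         r = r * (i + 1)
--     return r
--
-- def cr(k, t, j):
--     if j > t:
--         return 0
--     if j == 0:
--         if t == 0:
--             return 1
--         return 0
--     return cr(k, t - 1, j) * (j * k - t + 1) + cr(k, t - 1, j - 1) * k
--
-- def mult_scalar_polynomial(l1, c):
--     l2 = [0 for _ in range(len(l1))]
--     for i in range(len(l1)):
--         l2[i] = l1[i] * c
--     return l2
--
-- def add_polynomials(l1, l2):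
--     l3 = [0 for _ in range(max(len(l1), len(l2)))]
--     for i in range(max(len(l1), len(l2))):
--         if i < len(l1):
--             l3[i] = l3[i] + l1[i]
--         if i < len(l2):
--             l3[i] = l3[i] + l2[i]
--     return l3
--
-- def multiply_polynomials(l1, l2):
--     l3 = [0 for _ in range(len(l1) + len(l2) - 1)]
--     for i in range(len(l1)):
--         for j in range(len(l2)):
--             l3[i + j] = l3[i + j] + l1[i] * l2[j]
--     return l3
--
-- def rho(k, j):
--     poly1 = [0 for _ in range(k + 1)]
--     poly1[0] = -1
--     poly1[k] = 1
--     # poly1 is (x^k-1).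
--
--     poly2 = [0 for _ in range(1)]
--     poly2[0] = 1
--     for i in range(k):
--         poly2 = multiply_polynomials(poly2, poly1)
--     # poly2 is (x^k-1)^k
--
--     poly3 = [0 for _ in range(1)]
--     poly3[0] = 1
--     for i in range(k - j - 1):
--         poly3 = multiply_polynomials(poly3, poly1)
--     # poly3 is (x^k-1)^(k-j-1)
--
--     poly4 = [0 for _ in range(k * j + k + 1)]
--     poly4[k * j + k] = 1
--     poly5 = multiply_polynomials(poly4, poly3)
--     # poly5 is (x^k-1)^{k-j-1}*x^{kj+k}
--
--     poly6 = add_polynomials(poly5, mult_scalar_polynomial(poly2, -1))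
--
--     f = fact(j)
--     if j % 2 == 1:
--         f = -f
--
--     return mult_scalar_polynomial(poly6, f * cr(k, k + 1, j + 2))
-- ===== SOURCE B (Python) =====
-- def rho(k, j):
--     # Scalar: (-1)^j * j! * cr(k, k+1, j+2), with cr computed bottom-up (DP rows
--     # over t) instead of A's exponential binary recursion.
--     jj = j + 2
--     row = [1] + [0] * jj                       # row[i] = cr(k, 0, i)
--     for t in range(1, k + 2):
--         row = [0] + [row[i] * (i * k - t + 1) + row[i - 1] * k
--                      for i in range(1, jj + 1)]
--     f = 1
--     for i in range(2, j + 1):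
--         f = f * i
--     if j % 2 == 1:
--         f = -f
--     s = f * row[jj]
--
--     # Coefficients of (x^k-1)^m via Pascal rows: coefficient of x^(k*i) is
--     # (-1)^(m-i) * C(m, i); no polynomial convolutions at all.
--     def binom(m):
--         b = [1]
--         for _ in range(m):
--             b = [1] + [b[i] + b[i + 1] for i in range(len(b) - 1)] + [1]
--         return b
--
--     m = k - j - 1
--     n = max(k * j + k + 1 + (m * k if m > 0 else 0), k * k + 1)
--     out = [0] * n
--     if m >= 0:
--         bm = binom(m)
--         for i in range(m + 1):
--             out[k * j + k + i * k] += (-1 if (m - i) % 2 else 1) * bm[i]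
--     else:
--         out[k * j + k] += 1
--     bk = binom(k)
--     for i in range(k + 1):
--         out[i * k] -= (-1 if (k - i) % 2 else 1) * bk[i]
--     return [c * s for c in out]
-- ===== Notes on version B (the rewrite author's own statement) =====
-- stated objective: faster
-- what changed: B replaces A's repeated full polynomial convolutions for (x^k-1)^m and A's exponential binary cr recursion by Pascal-row binomial coefficients written directly at the multiples of k, and a bottom-up DP row for the cr recurrence.
import Mathlib
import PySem

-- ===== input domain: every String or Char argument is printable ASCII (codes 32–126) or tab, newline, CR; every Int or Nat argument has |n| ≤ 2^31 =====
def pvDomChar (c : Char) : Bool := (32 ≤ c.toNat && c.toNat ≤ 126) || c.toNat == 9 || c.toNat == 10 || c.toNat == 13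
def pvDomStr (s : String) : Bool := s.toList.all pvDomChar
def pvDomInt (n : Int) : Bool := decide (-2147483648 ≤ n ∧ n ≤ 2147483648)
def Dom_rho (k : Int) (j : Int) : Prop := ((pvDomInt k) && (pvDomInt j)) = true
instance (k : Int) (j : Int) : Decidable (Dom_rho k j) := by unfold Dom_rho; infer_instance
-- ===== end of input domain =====

-- B changes the algorithm (binomial coefficients via Pascal rows instead of repeated
-- convolutions, bottom-up DP instead of A's exponential cr recursion); measured faster.

-- ===== PORT A =====

-- fact(j): r = 1; for i in range(j): r = r * (i + 1)
def factA (j : Int) : Int :=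
  (PySem.List.pyRange 0 j 1).foldl (fun r i => r * (i + 1)) 1

-- cr(k, t, j): defined here on Nat t, j — exact for the nonnegative arguments rho
-- passes (under Pre_rho, t = k+1 ≥ 1 and j+2 ≥ 0, and the recursion stays nonnegative).
def crA (k : Int) (t : Nat) (jv : Nat) : Int :=
  match t with
  | 0 => if jv > 0 then 0 else 1            -- j > t → 0 ; j == 0 ∧ t == 0 → 1
  | t' + 1 =>
    if jv > t' + 1 then 0
    else if jv = 0 then 0                   -- j == 0, t ≠ 0
    else crA k t' jv * ((jv : Int) * k - ((t' : Int) + 1) + 1) + crA k t' (jv - 1) * k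

-- mult_scalar_polynomial: indices are all nonnegative, so Nat range/getD/set are exact
def multScalar (l1 : List Int) (c : Int) : List Int :=
  (List.range l1.length).foldl (fun l2 i => l2.set i (l1.getD i 0 * c))
    (List.replicate l1.length 0)

-- add_polynomials
def addPolys (l1 l2 : List Int) : List Int :=
  (List.range (max l1.length l2.length)).foldl
    (fun l3 i =>
      let l3 := if i < l1.length then l3.set i (l3.getD i 0 + l1.getD i 0) else l3
      if i < l2.length then l3.set i (l3.getD i 0 + l2.getD i 0) else l3)
    (List.replicate (max l1.length l2.length) 0)

-- multiply_polynomials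
def mulPolys (l1 l2 : List Int) : List Int :=
  (List.range l1.length).foldl
    (fun l3 i =>
      (List.range l2.length).foldl
        (fun l3 jj => l3.set (i + jj) (l3.getD (i + jj) 0 + l1.getD i 0 * l2.getD jj 0))
        l3)
    (List.replicate (l1.length + l2.length - 1) 0)

-- rho(k, j); indices 0, k, k*j+k are nonnegative under Pre_rho, so .toNat is exact
def rho (k : Int) (j : Int) : List Int :=
  let poly1 := ((List.replicate (k + 1).toNat 0).set 0 (-1)).set k.toNat 1
  let poly2 := (List.range k.toNat).foldl (fun p _ => mulPolys p poly1)
    ((List.replicate 1 0).set 0 1)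
  let poly3 := (List.range (k - j - 1).toNat).foldl (fun p _ => mulPolys p poly1)
    ((List.replicate 1 0).set 0 1)
  let poly4 := (List.replicate (k * j + k + 1).toNat 0).set (k * j + k).toNat 1
  let poly5 := mulPolys poly4 poly3
  let poly6 := addPolys poly5 (multScalar poly2 (-1))
  let f := factA j
  let f := if PySem.Int.mod j 2 = 1 then -f else f
  multScalar poly6 (f * crA k (k + 1).toNat (j + 2).toNat)

-- ===== PORT B =====

-- binom(m): Pascal rows; b = [1] + [b[i] + b[i+1] for i in range(len(b)-1)] + [1]
def binomRowB (m : Nat) : List Int :=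
  (List.range m).foldl
    (fun b _ => 1 :: ((List.range (b.length - 1)).map (fun i => b.getD i 0 + b.getD (i + 1) 0) ++ [1]))
    [1]

def rho_alt (k : Int) (j : Int) : List Int :=
  let jj := (j + 2).toNat                    -- j + 2 ≥ 0 under Pre_rho
  -- DP rows for cr: row[i] = cr(k, t, i)
  let row := (PySem.List.pyRange 1 (k + 2) 1).foldl
    (fun row t => 0 :: (List.range jj).map
      (fun i' => row.getD (i' + 1) 0 * (((i' : Int) + 1) * k - t + 1) + row.getD i' 0 * k))
    (1 :: List.replicate jj 0)
  let f := (PySem.List.pyRange 2 (j + 1) 1).foldl (fun f i => f * i) 1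
  let f := if PySem.Int.mod j 2 = 1 then -f else f
  let s := f * row.getD jj 0
  let m := k - j - 1
  let n := max (k * j + k + 1 + (if m > 0 then m * k else 0)) (k * k + 1)
  let out := List.replicate n.toNat 0
  let out :=
    if 0 ≤ m then
      let bm := binomRowB m.toNat
      (List.range (m.toNat + 1)).foldl
        (fun out (i : Nat) =>
          let p := (k * j + k + (i : Int) * k).toNat
          out.set p (out.getD p 0 +
            (if PySem.Int.mod (m - (i : Int)) 2 = 1 then -1 else 1) * bm.getD i 0))
        out
    else
      out.set (k * j + k).toNat (out.getD (k * j + k).toNat 0 + 1)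
  let bk := binomRowB k.toNat
  let out := (List.range (k.toNat + 1)).foldl
    (fun out (i : Nat) =>
      let p := ((i : Int) * k).toNat
      out.set p (out.getD p 0 -
        (if PySem.Int.mod (k - (i : Int)) 2 = 1 then -1 else 1) * bk.getD i 0))
    out
  out.map (· * s)

-- ===== PRECONDITION & SPEC =====

-- Pre_rho excludes exactly the inputs on which A raises: k < 0 and (k ≥ 1 ∧ j ≤ -2)
-- raise IndexError building poly1/poly4, and k = 0 ∧ j ≤ -3 makes cr recurse forever
-- (RecursionError).
def Pre_rho (k : Int) (j : Int) : Prop := (1 ≤ k ∧ -1 ≤ j) ∨ (k = 0 ∧ -2 ≤ j)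
instance (k : Int) (j : Int) : Decidable (Pre_rho k j) := by unfold Pre_rho; infer_instance

def pvWitness_rho : Int × Int := (2, 0)

def Spec_rho (k : Int) (j : Int) (out : List Int) : Prop := out = rho_alt k j
instance (k : Int) (j : Int) (out : List Int) : Decidable (Spec_rho k j out) := by unfold Spec_rho; infer_instance

-- ===== CLAIM (what is proved, stated in full; the proofs are below) =====
def Claim_equal_rho : Prop := ∀ (k : Int) (j : Int), Dom_rho k j → Pre_rho k j → Spec_rho k j (rho k j)

-- ===== LEMMAS AND PROOFS =====

-- ---- generic list machinery ----
theorem getD_set (l : List Int) (i j : Nat) (v : Int) :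
    (l.set i v).getD j 0 = if j = i ∧ i < l.length then v else l.getD j 0 := by
  simp only [List.getD, List.getElem?_set]
  split_ifs with h1 h2 h3 h4 <;> simp_all

theorem getD_ge (l : List Int) (n : Nat) (h : l.length ≤ n) : l.getD n 0 = 0 := by
  simp [List.getD, List.getElem?_eq_none h]

theorem getD_map_range (n k : Nat) (f : Nat → Int) (h : k < n) :
    ((List.range n).map f).getD k 0 = f k := by
  simp [List.getD, List.getElem?_map, List.getElem?_range h]

theorem listEqOfGetD (a b : List Int) (hlen : a.length = b.length)
    (h : ∀ t, t < a.length → a.getD t 0 = b.getD t 0) : a = b := by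
  apply List.ext_getElem hlen
  intro i h1 h2
  have := h i h1
  rwa [List.getD_eq_getElem _ _ h1, List.getD_eq_getElem _ _ h2] at this

theorem sumIte (n i0 : Nat) (f : Nat → Int) :
    ((List.range n).map (fun i => if i = i0 then f i else 0)).sum = if i0 < n then f i0 else 0 := by
  induction n with
  | zero => simp
  | succ n ih =>
    rw [List.range_succ, List.map_append, List.sum_append, ih]
    by_cases h : i0 < n <;> by_cases h2 : n = i0 <;> simp [h, h2] <;> omega

theorem buildFold (F : List Int → Nat → List Int) (h : Nat → Int → Int) :
    ∀ (n : Nat) (init : List Int), n ≤ init.length →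
    (∀ l i, l.length = init.length → i < n → F l i = l.set i (h i (l.getD i 0))) →
    (List.range n).foldl F init = (List.range n).map (fun i => h i (init.getD i 0)) ++ init.drop n := by
  intro n
  induction n with
  | zero => simp
  | succ n ih =>
    intro init hlen hF
    rw [List.range_succ, List.foldl_append, List.foldl_cons, List.foldl_nil]
    rw [ih init (by omega) (fun l i hl hi => hF l i hl (by omega))]
    have hlen2 : ((List.range n).map (fun i => h i (init.getD i 0)) ++ init.drop n).length = init.length := by
      simp; omega
    rw [hF _ n hlen2 (by omega)]
    have hdrop : init.drop n = init.getD n 0 :: init.drop (n+1) := by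
      rw [List.getD_eq_getElem _ _ (by omega)]
      exact (List.drop_eq_getElem_cons (by omega)).trans rfl
    have hget : ((List.range n).map (fun i => h i (init.getD i 0)) ++ init.drop n).getD n 0 = init.getD n 0 := by
      rw [hdrop]
      simp [List.getD]
    rw [hget, hdrop]
    have hset : ∀ (pre : List Int) (x v : Int) (suf : List Int),
        (pre ++ x :: suf).set pre.length v = pre ++ v :: suf := by
      intro pre x v suf
      rw [List.set_append_right _ _ (le_refl _)]
      simp
    have hpre : ((List.range n).map (fun i => h i (init.getD i 0))).length = n := by simp
    have hs := hset ((List.range n).map fun i => h i (init.getD i 0)) (init.getD n 0)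
      (h n (init.getD n 0)) (init.drop (n+1))
    rw [hpre] at hs
    rw [hs]
    simp

theorem addFold {α : Type} (pos : α → Nat) (val : α → Int) :
    ∀ (xs : List α) (a : List Int), (∀ x ∈ xs, pos x < a.length) →
    (xs.foldl (fun a x => a.set (pos x) (a.getD (pos x) 0 + val x)) a).length = a.length ∧
    ∀ t, (xs.foldl (fun a x => a.set (pos x) (a.getD (pos x) 0 + val x)) a).getD t 0
        = a.getD t 0 + (xs.map (fun x => if pos x = t then val x else 0)).sum := by
  intro xs
  induction xs with
  | nil => simp
  | cons x xs ih =>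
    intro a hpos
    rw [List.foldl_cons]
    have hlen : (a.set (pos x) (a.getD (pos x) 0 + val x)).length = a.length := by simp
    obtain ⟨ih1, ih2⟩ := ih (a.set (pos x) (a.getD (pos x) 0 + val x))
      (by intro y hy; rw [hlen]; exact hpos y (List.mem_cons_of_mem _ hy))
    refine ⟨by rw [ih1, hlen], ?_⟩
    intro t
    rw [ih2 t, getD_set]
    have hx := hpos x (List.mem_cons_self)
    by_cases h : t = pos x
    · simp only [List.map_cons, List.sum_cons, h, hx, and_true, if_true]
      ring
    · simp only [List.map_cons, List.sum_cons, h, false_and, if_false, if_neg (Ne.symm h)]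
      ring

theorem nestFold {α β : Type} (g : List Int → α → β → List Int) (xs : List α) (ys : List β) :
    ∀ (a : List Int), xs.foldl (fun a i => ys.foldl (fun a j => g a i j) a) a
    = (xs.flatMap (fun i => ys.map (Prod.mk i))).foldl (fun a p => g a p.1 p.2) a := by
  induction xs with
  | nil => intro a; rfl
  | cons x xs ih => intro a; simp only [List.flatMap_cons, List.foldl_append, List.foldl_map, List.foldl_cons, ih]
theorem mulPolys_length (l1 l2 : List Int) :
    (mulPolys l1 l2).length = l1.length + l2.length - 1 := by
  unfold mulPolys
  rw [nestFold]
  have := addFold (fun p : Nat × Nat => p.1 + p.2) (fun p => l1.getD p.1 0 * l2.getD p.2 0)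
    ((List.range l1.length).flatMap fun i => (List.range l2.length).map (Prod.mk i))
    (List.replicate (l1.length + l2.length - 1) 0) ?_
  · exact this.1.trans (by simp)
  · intro p hp
    simp only [List.mem_flatMap, List.mem_map, List.mem_range] at hp
    obtain ⟨i, hi, jj, hjj, rfl⟩ := hp
    simp only [List.length_replicate]
    omega

theorem mulPolys_getD (l1 l2 : List Int) (t : Nat) :
    (mulPolys l1 l2).getD t 0
      = ((List.range l1.length).map
          (fun i => if i ≤ t then l1.getD i 0 * l2.getD (t - i) 0 else 0)).sum := by
  unfold mulPolys
  rw [nestFold]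
  have := addFold (fun p : Nat × Nat => p.1 + p.2) (fun p => l1.getD p.1 0 * l2.getD p.2 0)
    ((List.range l1.length).flatMap fun i => (List.range l2.length).map (Prod.mk i))
    (List.replicate (l1.length + l2.length - 1) 0) ?_
  · rw [this.2 t]
    have h0 : (List.replicate (l1.length + l2.length - 1) (0:Int)).getD t 0 = 0 := by
      simp [List.getD, List.getElem?_replicate]; split <;> simp
    rw [h0, zero_add, List.map_flatMap, List.flatMap_def, List.sum_flatten, List.map_map]
    congr 1
    apply List.map_congr_left
    intro i hi
    simp only [Function.comp_def, List.map_map]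
    by_cases hit : i ≤ t
    · have hc : ∀ jj ∈ List.range l2.length,
          (if i + jj = t then l1.getD i 0 * l2.getD jj 0 else 0)
          = (if jj = t - i then l1.getD i 0 * l2.getD jj 0 else 0) := by
        intro jj _
        congr 1
        simp only [eq_iff_iff]
        omega
      rw [List.map_congr_left hc, sumIte, if_pos hit]
      split
      · rfl
      · rw [getD_ge l2 (t - i) (by omega), mul_zero]
    · have hc : ∀ jj ∈ List.range l2.length,
          (if i + jj = t then l1.getD i 0 * l2.getD jj 0 else 0) = 0 := by
        intro jj _
        rw [if_neg (by omega)]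
      rw [List.map_congr_left hc, if_neg hit]
      simp
  · intro p hp
    simp only [List.mem_flatMap, List.mem_map, List.mem_range] at hp
    obtain ⟨i, hi, jj, hjj, rfl⟩ := hp
    simp only [List.length_replicate]
    omega

-- ---- (x^K - 1) and its powers ----
def poly1L (K : Nat) : List Int := ((List.replicate (K + 1) 0).set 0 (-1)).set K 1

theorem poly1L_getD (K : Nat) (hK : 1 ≤ K) (x : Nat) :
    (poly1L K).getD x 0 = if x = 0 then -1 else if x = K then 1 else 0 := by
  unfold poly1L
  rw [getD_set, getD_set]
  have h1 : ((List.replicate (K+1) (0:Int)).set 0 (-1)).length = K + 1 := by simp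
  have h2 : (List.replicate (K+1) (0:Int)).getD x 0 = 0 := by
    simp [List.getD, List.getElem?_replicate]; split <;> simp
  rw [h1, h2]
  simp only [List.length_replicate]
  split_ifs <;> first | rfl | omega

theorem poly1L_length (K : Nat) : (poly1L K).length = K + 1 := by simp [poly1L]

theorem mulSparse_getD (K : Nat) (hK : 1 ≤ K) (p : List Int) (t : Nat) :
    (mulPolys p (poly1L K)).getD t 0
      = -(p.getD t 0) + (if K ≤ t then p.getD (t - K) 0 else 0) := by
  rw [mulPolys_getD]
  have hc : ∀ i ∈ List.range p.length,
      (if i ≤ t then p.getD i 0 * (poly1L K).getD (t - i) 0 else 0)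
      = (if i = t then -(p.getD i 0) else 0)
        + (if K ≤ t ∧ i = t - K then p.getD i 0 else 0) := by
    intro i _
    rw [poly1L_getD K hK]
    by_cases h1 : i = t
    · subst h1
      rw [if_pos (le_refl i), Nat.sub_self, if_pos rfl, if_pos rfl, if_neg (by omega : ¬(K ≤ i ∧ i = i - K))]
      ring
    · by_cases h2 : K ≤ t ∧ i = t - K
      · obtain ⟨h2a, h2b⟩ := h2
        subst h2b
        rw [if_pos (by omega), if_neg h1, if_neg (by omega), if_pos (by omega)]
        rw [if_pos ⟨h2a, rfl⟩]
        ring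
      · rw [if_neg h1, if_neg h2]
        by_cases h3 : i ≤ t
        · rw [if_pos h3, if_neg (by omega), if_neg (by omega)]
          ring
        · rw [if_neg h3]
          ring
  rw [List.map_congr_left hc]
  rw [show (fun i => (if i = t then -(p.getD i 0) else 0)
        + (if K ≤ t ∧ i = t - K then p.getD i 0 else 0))
      = (fun i => (fun i => if i = t then -(p.getD i 0) else 0) i
        + (fun i => if K ≤ t ∧ i = t - K then p.getD i 0 else 0) i) from rfl]
  rw [PySem.List.sum_map_add_int, sumIte]
  congr 1
  · split
    · rfl
    · rw [getD_ge p t (by omega)]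
      ring
  · by_cases hKt : K ≤ t
    · have : ∀ i ∈ List.range p.length,
          (if K ≤ t ∧ i = t - K then p.getD i 0 else 0) = (if i = t - K then p.getD i 0 else 0) := by
        intro i _
        by_cases h : i = t - K <;> simp [h, hKt]
      rw [List.map_congr_left this, sumIte, if_pos hKt]
      split
      · rfl
      · rw [getD_ge p (t - K) (by omega)]
    · have : ∀ i ∈ List.range p.length,
          (if K ≤ t ∧ i = t - K then p.getD i 0 else 0) = 0 := by
        intro i _
        simp [hKt]
      rw [List.map_congr_left this, if_neg hKt]
      simp

def coefPow (K r t : Nat) : Int :=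
  if t % K = 0 then (-1 : Int) ^ (r - t / K) * (Nat.choose r (t / K) : Int) else 0

theorem coefPow_ge (K r t : Nat) (hK : 1 ≤ K) (h : r * K < t) : coefPow K r t = 0 := by
  unfold coefPow
  split
  · rename_i hmod
    have hq : r < t / K := by
      rcases Nat.dvd_of_mod_eq_zero hmod with ⟨q, rfl⟩
      rw [Nat.mul_div_cancel_left _ (by omega)]
      by_contra hq2
      push Not at hq2
      have h2 := Nat.mul_le_mul_left K hq2
      have h3 : r * K = K * r := Nat.mul_comm r K
      omega
    rw [Nat.choose_eq_zero_of_lt hq]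
    ring
  · rfl

theorem coefPow_getD (K r t : Nat) (hK : 1 ≤ K) :
    ((List.range (r * K + 1)).map (coefPow K r)).getD t 0 = coefPow K r t := by
  by_cases h : t < r * K + 1
  · exact getD_map_range _ _ _ h
  · rw [getD_ge _ _ (by simp; omega), coefPow_ge K r t hK (by omega)]

theorem pascalStep (K r : Nat) (hK : 1 ≤ K) (t : Nat) :
    -(coefPow K r t) + (if K ≤ t then coefPow K r (t - K) else 0) = coefPow K (r + 1) t := by
  unfold coefPow
  by_cases hmod : t % K = 0
  · rcases Nat.dvd_of_mod_eq_zero hmod with ⟨q, rfl⟩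
    have hdiv : K * q / K = q := Nat.mul_div_cancel_left _ (by omega)
    rw [if_pos hmod, if_pos hmod, hdiv]
    rcases Nat.eq_zero_or_pos q with hq | hq
    · subst hq
      rw [if_neg (by omega)]
      simp [pow_succ]
    · have hKq : K ≤ K * q := by nlinarith
      rw [if_pos hKq]
      have hKqK : K * q - K = K * (q - 1) := by
        rw [Nat.mul_sub, Nat.mul_one]
      have hsub : (K * q - K) % K = 0 := by rw [hKqK]; exact Nat.mul_mod_right K (q - 1)
      have hdiv2 : (K * q - K) / K = q - 1 := by
        rw [hKqK]; exact Nat.mul_div_cancel_left _ (by omega)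
      rw [if_pos hsub, hdiv2]
      by_cases hqr : q ≤ r
      · have e1 : r - (q - 1) = (r - q) + 1 := by omega
        have e2 : r + 1 - q = (r - q) + 1 := by omega
        have e3 : q - 1 + 1 = q := by omega
        rw [e1, e2, ← e3, Nat.choose_succ_succ]
        simp only [Nat.succ_eq_add_one, e3]
        rw [pow_succ]
        push_cast
        ring
      · by_cases hq1 : q = r + 1
        · subst hq1
          rw [show r + 1 - 1 = r by omega, Nat.choose_eq_zero_of_lt (by omega : r < r + 1),
            Nat.choose_self, Nat.choose_self, Nat.sub_self,
            show r + 1 - (r + 1) = 0 by omega]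
          simp
        · rw [Nat.choose_eq_zero_of_lt (by omega), Nat.choose_eq_zero_of_lt (by omega),
            Nat.choose_eq_zero_of_lt (by omega)]
          simp
  · rw [if_neg hmod, if_neg hmod]
    by_cases hKt : K ≤ t
    · rcases Nat.exists_eq_add_of_le hKt with ⟨s, rfl⟩
      rw [if_pos (by omega)]
      rw [show K + s - K = s by omega]
      rw [if_neg (by rwa [Nat.add_mod_left] at hmod)]
      ring
    · rw [if_neg hKt]
      ring

theorem powA_spec (K : Nat) (hK : 1 ≤ K) (r : Nat) :
    (List.range r).foldl (fun p _ => mulPolys p (poly1L K)) ((List.replicate 1 0).set 0 1)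
      = (List.range (r * K + 1)).map (coefPow K r) := by
  induction r with
  | zero =>
    simp only [List.range_zero, List.foldl_nil, Nat.zero_mul, Nat.zero_add]
    simp [coefPow, List.range_succ]
  | succ r ih =>
    rw [List.range_succ, List.foldl_append, List.foldl_cons, List.foldl_nil, ih]
    apply listEqOfGetD
    · rw [mulPolys_length, poly1L_length]
      simp [Nat.succ_mul]
      omega
    · intro t ht
      rw [mulPolys_length, poly1L_length] at ht
      simp only [List.length_map, List.length_range] at ht
      rw [mulSparse_getD K hK, coefPow_getD K r t hK]
      have h2 : ((List.range (r * K + 1)).map (coefPow K r)).getD (t - K) 0 = coefPow K r (t - K) :=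
        coefPow_getD K r (t - K) hK
      rw [h2, pascalStep K r hK t, getD_map_range _ _ _ (by simp [Nat.succ_mul] at ht ⊢; omega)]

-- poly4 * q : a pure shift by N
theorem mulDelta_getD (N : Nat) (q : List Int) (t : Nat) :
    (mulPolys ((List.replicate (N + 1) 0).set N 1) q).getD t 0
      = if N ≤ t then q.getD (t - N) 0 else 0 := by
  rw [mulPolys_getD]
  have hlen : ((List.replicate (N + 1) (0:Int)).set N 1).length = N + 1 := by simp
  have hdelta : ∀ x : Nat, ((List.replicate (N + 1) (0:Int)).set N 1).getD x 0
      = if x = N then 1 else 0 := by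
    intro x
    rw [getD_set]
    have h2 : (List.replicate (N+1) (0:Int)).getD x 0 = 0 := by
      simp [List.getD, List.getElem?_replicate]; split <;> simp
    rw [h2]
    simp only [List.length_replicate]
    split_ifs <;> first | rfl | omega
  rw [hlen]
  have hc : ∀ i ∈ List.range (N + 1),
      (if i ≤ t then ((List.replicate (N + 1) 0).set N 1).getD i 0 * q.getD (t - i) 0 else 0)
      = (if i = N then (if N ≤ t then q.getD (t - N) 0 else 0) else 0) := by
    intro i hi
    rw [hdelta i]
    by_cases h1 : i = N
    · subst h1
      by_cases h2 : i ≤ t <;> simp [h2]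
    · by_cases h2 : i ≤ t <;> simp [h1, h2]
  rw [List.map_congr_left hc, sumIte, if_pos (by omega)]

theorem binomRowB_spec (m : Nat) :
    binomRowB m = (List.range (m + 1)).map (fun i => (Nat.choose m i : Int)) := by
  unfold binomRowB
  induction m with
  | zero => simp
  | succ m ih =>
    rw [List.range_succ, List.foldl_append, List.foldl_cons, List.foldl_nil, ih]
    have hlen : ((List.range (m + 1)).map (fun i => (Nat.choose m i : Int))).length = m + 1 := by simp
    rw [hlen]
    have hc : ∀ i ∈ List.range (m + 1 - 1),
        ((List.range (m + 1)).map (fun i => (Nat.choose m i : Int))).getD i 0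
          + ((List.range (m + 1)).map (fun i => (Nat.choose m i : Int))).getD (i + 1) 0
        = (fun i => ((Nat.choose (m + 1) (i + 1) : Int))) i := by
      intro i hi
      simp only [List.mem_range] at hi
      rw [getD_map_range _ _ _ (by omega), getD_map_range _ _ _ (by omega)]
      show _ = ((Nat.choose (m + 1) (i + 1) : Int))
      rw [Nat.choose_succ_succ m i]
      push_cast
      ring
    rw [List.map_congr_left hc]
    rw [List.range_succ_eq_map, List.range_succ, List.map_cons, List.map_map, List.map_append]
    simp [Nat.choose_succ_succ, Function.comp_def]

theorem multScalar_spec (l : List Int) (c : Int) :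
    multScalar l c = (List.range l.length).map (fun i => l.getD i 0 * c) := by
  unfold multScalar
  rw [buildFold _ (fun i _ => l.getD i 0 * c) l.length (List.replicate l.length 0)
    (by simp) (fun l2 i hl hi => rfl)]
  simp

theorem addPolys_length (a b : List Int) :
    (addPolys a b).length = max a.length b.length := by
  unfold addPolys
  rw [buildFold _ (fun i v => v + a.getD i 0 + b.getD i 0) _ _ (by simp) ?_]
  · simp
  · intro l i hl hi
    simp only [List.length_replicate] at hl
    by_cases h1 : i < a.length <;> by_cases h2 : i < b.length
    · simp only [h1, h2, if_true]
      rw [getD_set, if_pos ⟨rfl, by omega⟩, List.set_set]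
    · simp only [h1, h2, if_true, if_false]
      rw [getD_ge b i (by omega), add_zero]
    · simp only [h1, h2, if_false, if_true]
      rw [getD_ge a i (by omega), add_zero]
    · omega

theorem addPolys_spec (a b : List Int) :
    addPolys a b = (List.range (max a.length b.length)).map (fun i => a.getD i 0 + b.getD i 0) := by
  unfold addPolys
  rw [buildFold _ (fun i v => v + a.getD i 0 + b.getD i 0) _ _ (by simp) ?_]
  · have hz : ∀ i : Nat, (List.replicate (max a.length b.length) (0:Int)).getD i 0 = 0 := by
      intro i; simp [List.getD, List.getElem?_replicate]; split <;> simp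
    simp only [hz, zero_add]
    simp
  · intro l i hl hi
    simp only [List.length_replicate] at hl
    by_cases h1 : i < a.length <;> by_cases h2 : i < b.length
    · simp only [h1, h2, if_true]
      rw [getD_set, if_pos ⟨rfl, by omega⟩, List.set_set]
    · simp only [h1, h2, if_true, if_false]
      rw [getD_ge b i (by omega), add_zero]
    · simp only [h1, h2, if_false, if_true]
      rw [getD_ge a i (by omega), add_zero]
    · omega

-- sum of binomial terms placed at N, N+K, ..., N+MK equals the shifted power coefficients
theorem placeSum (K M N t : Nat) (hK : 1 ≤ K) :
    ((List.range (M + 1)).map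
      (fun i => if N + i * K = t then (-1 : Int) ^ (M - i) * (Nat.choose M i : Int) else 0)).sum
    = if N ≤ t then coefPow K M (t - N) else 0 := by
  by_cases hN : N ≤ t
  · by_cases hmod : (t - N) % K = 0
    · rcases Nat.dvd_of_mod_eq_zero hmod with ⟨q, hq⟩
      have hc : ∀ i ∈ List.range (M + 1),
          (if N + i * K = t then (-1 : Int) ^ (M - i) * (Nat.choose M i : Int) else 0)
          = (if i = q then (-1 : Int) ^ (M - i) * (Nat.choose M i : Int) else 0) := by
        intro i _
        congr 1
        simp only [eq_iff_iff]
        constructor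
        · intro h
          have : i * K = K * q := by omega
          have : i * K = q * K := by rw [this, Nat.mul_comm]
          exact Nat.eq_of_mul_eq_mul_right (by omega) this
        · rintro rfl
          have : i * K = K * i := Nat.mul_comm i K
          omega
      rw [List.map_congr_left hc, sumIte, if_pos hN]
      unfold coefPow
      rw [if_pos hmod, hq, Nat.mul_div_cancel_left _ (by omega)]
      split
      · rfl
      · rw [Nat.choose_eq_zero_of_lt (by omega)]
        simp
    · have hc : ∀ i ∈ List.range (M + 1),
          (if N + i * K = t then (-1 : Int) ^ (M - i) * (Nat.choose M i : Int) else 0) = 0 := by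
        intro i _
        rw [if_neg]
        intro h
        have : t - N = i * K := by omega
        rw [this, Nat.mul_mod_left] at hmod
        exact hmod rfl
      rw [List.map_congr_left hc, if_pos hN]
      unfold coefPow
      rw [if_neg hmod]
      simp
  · have hc : ∀ i ∈ List.range (M + 1),
        (if N + i * K = t then (-1 : Int) ^ (M - i) * (Nat.choose M i : Int) else 0) = 0 := by
      intro i _
      rw [if_neg (by omega)]
    rw [List.map_congr_left hc, if_neg hN]
    simp

theorem signEq (a b : Nat) (h : b ≤ a) :
    (if PySem.Int.mod ((a : Int) - (b : Int)) 2 = 1 then (-1 : Int) else 1) = (-1 : Int) ^ (a - b) := by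
  have e1 : (a : Int) - (b : Int) = ((a - b : Nat) : Int) := by push_cast; omega
  rw [e1, show (2:Int) = ((2:Nat):Int) from rfl, PySem.Int.mod_natCast]
  rcases Nat.even_or_odd (a - b) with he | ho
  · rw [if_neg (by rcases he with ⟨c, hc⟩; omega)]
    exact (Even.neg_one_pow he).symm
  · rw [if_pos (by rcases ho with ⟨c, hc⟩; omega)]
    exact (Odd.neg_one_pow ho).symm

theorem crA_gt (k : Int) (t jv : Nat) (h : t < jv) : crA k t jv = 0 := by
  cases t with
  | zero => unfold crA; rw [if_pos (by omega)]
  | succ t' => unfold crA; rw [if_pos (by omega)]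

theorem crA_step (k : Int) (n i : Nat) :
    crA k (n + 1) (i + 1)
      = crA k n (i + 1) * (((i + 1 : Nat) : Int) * k - ((n : Int) + 1) + 1) + crA k n i * k := by
  show (if i + 1 > n + 1 then (0:Int)
    else if i + 1 = 0 then 0
    else crA k n (i + 1) * (((i + 1 : Nat) : Int) * k - ((n : Int) + 1) + 1) + crA k n (i + 1 - 1) * k) = _
  by_cases h : i + 1 > n + 1
  · rw [if_pos h, crA_gt k n (i + 1) (by omega), crA_gt k n i (by omega)]
    ring
  · rw [if_neg h, if_neg (by omega)]
    rfl

theorem rowSpec (k : Int) (jj : Nat) (n : Nat) :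
    (List.range n).foldl
      (fun row (c : Nat) => 0 :: (List.range jj).map
        (fun i' => row.getD (i' + 1) 0 * (((i' : Int) + 1) * k - (1 + (c : Int)) + 1) + row.getD i' 0 * k))
      (1 :: List.replicate jj 0)
    = (List.range (jj + 1)).map (fun i => crA k n i) := by
  induction n with
  | zero =>
    rw [List.range_zero, List.foldl_nil, List.range_succ_eq_map, List.map_cons, List.map_map]
    show _ = crA k 0 0 :: _
    have h0 : crA k 0 0 = 1 := by unfold crA; rw [if_neg (by omega)]
    rw [h0]
    congr 1
    simp only [Function.comp_def]
    have : ∀ x ∈ List.range jj, crA k 0 (Nat.succ x) = (fun _ => (0:Int)) x := by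
      intro x _
      exact crA_gt k 0 (x + 1) (by omega)
    rw [List.map_congr_left this, List.map_const']
    simp
  | succ n ih =>
    have h0 : crA k (n + 1) 0 = 0 := by
      show (if 0 > n + 1 then (0:Int) else if (0:Nat) = 0 then 0 else _) = 0
      rw [if_neg (by omega), if_pos rfl]
    have hr : (List.range (jj + 1)).map (fun i => crA k (n + 1) i)
        = crA k (n + 1) 0 :: (List.range jj).map (fun i' => crA k (n + 1) (i' + 1)) := by
      rw [show List.range (jj + 1) = 0 :: List.map Nat.succ (List.range jj) from List.range_succ_eq_map,
        List.map_cons, List.map_map]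
      simp [Function.comp_def]
    rw [List.range_succ, List.foldl_append, List.foldl_cons, List.foldl_nil, ih, hr, h0]
    congr 1
    apply List.map_congr_left
    intro i' hi'
    simp only [List.mem_range] at hi'
    rw [getD_map_range _ _ _ (by omega), getD_map_range _ _ _ (by omega)]
    rw [crA_step k n i']
    push_cast
    ring

theorem factEq (j : Int) :
    factA j = (PySem.List.pyRange 2 (j + 1) 1).foldl (fun f i => f * i) 1 := by
  rcases le_or_gt j 0 with hneg | hpos
  · rw [show factA j = (PySem.List.pyRange 0 j 1).foldl (fun r i => r * (i + 1)) 1 from rfl]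
    rw [PySem.List.pyRange_one_eq_nil (by omega), PySem.List.pyRange_one_eq_nil (by omega)]
    rfl
  · obtain ⟨n, rfl⟩ : ∃ n : Nat, j = (n : Int) := ⟨j.toNat, by omega⟩
    induction n with
    | zero => rfl
    | succ n ih =>
      have hA : factA ((n : Int) + 1)
          = factA (n : Int) * ((n : Int) + 1) := by
        show (PySem.List.pyRange 0 ((n:Int) + 1) 1).foldl (fun r i => r * (i + 1)) 1 = _
        rw [PySem.List.pyRange_one_succ_right (by omega), List.foldl_append]
        rfl
      cases n with
      | zero => decide
      | succ n' =>
        have h2 : ((n' + 1 + 1 : Nat) : Int) = ((n' + 1 : Nat) : Int) + 1 := by push_cast; ring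
        rw [h2, hA]
        rw [show ((n' + 1 : Nat) : Int) + 1 + 1 = (((n' + 1 : Nat) : Int) + 1) + 1 from rfl]
        rw [PySem.List.pyRange_one_succ_right (by push_cast; omega), List.foldl_append]
        rw [← ih (by push_cast; omega)]
        rfl

theorem getD_repl0 (n t : Nat) : (List.replicate n (0:Int)).getD t 0 = 0 := by
  simp [List.getD, List.getElem?_replicate]; split <;> simp

theorem getD_map_mul (l : List Int) (s : Int) (t : Nat) :
    (l.map (· * s)).getD t 0 = l.getD t 0 * s := by
  simp only [List.getD, List.getElem?_map]
  cases l[t]? <;> simp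

theorem sumMapNeg (l : List Nat) (f : Nat → Int) :
    (l.map (fun i => -(f i))).sum = -((l.map f).sum) := by
  induction l with
  | nil => simp
  | cons x xs ih => simp [ih]; ring

-- A-side aggregate: rho for k = K ≥ 1, j = J - 1
theorem rhoA_eq (K J : Nat) (hK : 1 ≤ K) :
    rho (K : Int) ((J : Int) - 1)
      = (List.range (max (K * J + (K - J) * K + 1) (K * K + 1))).map
          (fun t => ((if K * J ≤ t then coefPow K (K - J) (t - K * J) else 0) - coefPow K K t)
            * ((if PySem.Int.mod ((J : Int) - 1) 2 = 1 then -(factA ((J : Int) - 1)) else factA ((J : Int) - 1))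
               * crA (K : Int) (K + 1) (J + 1))) := by
  have e1 : ((K : Int) + 1).toNat = K + 1 := by omega
  have e2 : (K : Int).toNat = K := by omega
  have e3 : ((K : Int) - ((J : Int) - 1) - 1).toNat = K - J := by omega
  have eN : (K : Int) * ((J : Int) - 1) + (K : Int) = ((K * J : Nat) : Int) := by push_cast; ring
  have e4 : ((K : Int) * ((J : Int) - 1) + (K : Int) + 1).toNat = K * J + 1 := by rw [eN]; omega
  have e5 : ((K : Int) * ((J : Int) - 1) + (K : Int)).toNat = K * J := by rw [eN]; omega
  have e6 : (((J : Int) - 1) + 2).toNat = J + 1 := by omega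
  simp only [rho, e1, e2, e3, e4, e5, e6]
  rw [show ((List.replicate (K + 1) (0:Int)).set 0 (-1)).set K 1 = poly1L K from rfl]
  rw [powA_spec K hK K, powA_spec K hK (K - J)]
  have hgm : ∀ (n : Nat) (g : Nat → Int) (t : Nat),
      ((List.range n).map g).getD t 0 = if t < n then g t else 0 := by
    intro n g t
    by_cases ht : t < n
    · rw [getD_map_range _ _ _ ht, if_pos ht]
    · rw [getD_ge _ _ (by simp; omega), if_neg ht]
  have hms : ∀ t : Nat, (multScalar ((List.range (K*K+1)).map (coefPow K K)) (-1)).getD t 0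
      = -(coefPow K K t) := by
    intro t
    rw [multScalar_spec]
    have hl : ((List.range (K*K+1)).map (coefPow K K)).length = K*K+1 := by simp
    rw [hl, hgm]
    split
    · rw [coefPow_getD K K t hK]; ring
    · rw [coefPow_ge K K t hK (by omega)]
      simp
  have hmsl : (multScalar ((List.range (K*K+1)).map (coefPow K K)) (-1)).length = K*K+1 := by
    rw [multScalar_spec]; simp
  have h5 : ∀ t : Nat, (mulPolys ((List.replicate (K*J+1) 0).set (K*J) 1)
      ((List.range ((K-J)*K+1)).map (coefPow K (K-J)))).getD t 0
      = if K*J ≤ t then coefPow K (K-J) (t - K*J) else 0 := by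
    intro t
    rw [mulDelta_getD]
    split
    · rw [coefPow_getD K (K-J) _ hK]
    · rfl
  have h5l : (mulPolys ((List.replicate (K*J+1) 0).set (K*J) 1)
      ((List.range ((K-J)*K+1)).map (coefPow K (K-J)))).length = K*J + (K-J)*K + 1 := by
    rw [mulPolys_length]
    simp
    omega
  rw [multScalar_spec, addPolys_length, h5l, hmsl]
  apply List.map_congr_left
  intro t ht
  simp only [List.mem_range] at ht
  congr 1
  rw [addPolys_spec, hgm, h5l, hmsl]
  split
  · rw [h5 t, hms t]
    ring
  · rename_i hcon
    exact absurd ht hcon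

theorem coefPow0 (K x : Nat) (hK : 1 ≤ K) : coefPow K 0 x = if x = 0 then 1 else 0 := by
  unfold coefPow
  rcases Nat.eq_zero_or_pos x with rfl | hx
  · simp
  · rw [if_neg (by omega : ¬x = 0)]
    by_cases hmod : x % K = 0
    · rw [if_pos hmod, Nat.choose_eq_zero_of_lt (by
        rcases Nat.dvd_of_mod_eq_zero hmod with ⟨q, rfl⟩
        rw [Nat.mul_div_cancel_left _ (by omega : 0 < K)]
        rcases Nat.eq_zero_or_pos q with rfl | hq
        · omega
        · omega)]
      ring
    · rw [if_neg hmod]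

theorem finishB (K J : Nat) (hK : 1 ≤ K) (S : Int) :
    List.map (fun x => x * S)
      ((List.range (K + 1)).foldl
        (fun out i =>
          out.set (i * K)
            (out.getD (i * K) 0 +
              -((if PySem.Int.mod ((K : Int) - (i : Int)) 2 = 1 then -1 else 1) *
                  ((List.range (K + 1)).map (fun i => ((K.choose i : Nat) : Int))).getD i 0)))
        ((List.range (max (K * J + (K - J) * K + 1) (K * K + 1))).map
          (fun t => if K * J ≤ t then coefPow K (K - J) (t - K * J) else 0)))
    = (List.range (max (K * J + (K - J) * K + 1) (K * K + 1))).map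
        (fun t => ((if K * J ≤ t then coefPow K (K - J) (t - K * J) else 0) - coefPow K K t) * S) := by
  have hmemB : ∀ x ∈ List.range (K + 1),
      (fun i : Nat => i * K) x
        < ((List.range (max (K * J + (K - J) * K + 1) (K * K + 1))).map
            (fun t => if K * J ≤ t then coefPow K (K - J) (t - K * J) else 0)).length := by
    intro x hx
    simp only [List.mem_range] at hx
    have : x * K ≤ K * K := Nat.mul_le_mul_right K (by omega)
    simp only [List.length_map, List.length_range]
    omega
  have h2 := addFold (fun i : Nat => i * K)
    (fun i : Nat => -((if PySem.Int.mod ((K : Int) - (i : Int)) 2 = 1 then -1 else 1) *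
      ((List.range (K + 1)).map (fun i => ((K.choose i : Nat) : Int))).getD i 0))
    (List.range (K + 1))
    ((List.range (max (K * J + (K - J) * K + 1) (K * K + 1))).map
      (fun t => if K * J ≤ t then coefPow K (K - J) (t - K * J) else 0)) hmemB
  apply listEqOfGetD
  · rw [List.length_map, h2.1]
    simp
  · intro t ht
    rw [List.length_map, h2.1, List.length_map, List.length_range] at ht
    rw [getD_map_mul, h2.2 t, getD_map_range _ _ _ ht, getD_map_range _ _ _ ht]
    have hc2 : ∀ i ∈ List.range (K + 1),
        (if i * K = t then
          -((if PySem.Int.mod ((K : Int) - (i : Int)) 2 = 1 then -1 else 1) *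
            ((List.range (K + 1)).map (fun i => ((K.choose i : Nat) : Int))).getD i 0) else 0)
        = -((fun i => if 0 + i * K = t then (-1 : Int) ^ (K - i) * ((K.choose i : Nat) : Int) else 0) i) := by
      intro i hi
      simp only [List.mem_range] at hi
      rw [getD_map_range _ _ _ hi, signEq K i (by omega)]
      simp only [Nat.zero_add]
      split <;> simp
    rw [List.map_congr_left hc2, sumMapNeg, placeSum K K 0 t hK]
    rw [if_pos (Nat.zero_le t), Nat.sub_zero]
    ring

theorem rhoB_eq (K J : Nat) (hK : 1 ≤ K) :
    rho_alt (K : Int) ((J : Int) - 1)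
      = (List.range (max (K * J + (K - J) * K + 1) (K * K + 1))).map
          (fun t => ((if K * J ≤ t then coefPow K (K - J) (t - K * J) else 0) - coefPow K K t)
            * ((if PySem.Int.mod ((J : Int) - 1) 2 = 1 then -(factA ((J : Int) - 1)) else factA ((J : Int) - 1))
               * crA (K : Int) (K + 1) (J + 1))) := by
  have e6 : (((J : Int) - 1) + 2).toNat = J + 1 := by omega
  have e7 : ((K : Int) + 2 - 1).toNat = K + 1 := by omega
  simp only [rho_alt, e6]
  rw [PySem.List.pyRange_one 1 ((K : Int) + 2)]
  rw [e7, List.foldl_map]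
  rw [rowSpec (K : Int) (J + 1) (K + 1)]
  rw [getD_map_range _ _ _ (by omega)]
  rw [← factEq ((J : Int) - 1)]
  have e2 : ((K : Int)).toNat = K := by omega
  have e3 : ((K : Int) - ((J : Int) - 1) - 1).toNat = K - J := by omega
  have eN : (K : Int) * ((J : Int) - 1) + (K : Int) = ((K * J : Nat) : Int) := by push_cast; ring
  have e5 : ((K : Int) * ((J : Int) - 1) + (K : Int)).toNat = K * J := by rw [eN]; omega
  have hp0 : ∀ i : Nat, ((i : Int) * (K : Int)).toNat = i * K := by
    intro i
    have : (i : Int) * (K : Int) = ((i * K : Nat) : Int) := by push_cast; ring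
    rw [this]; omega
  have hp1 : ∀ i : Nat, ((K : Int) * ((J : Int) - 1) + (K : Int) + (i : Int) * (K : Int)).toNat
      = K * J + i * K := by
    intro i
    have : (K : Int) * ((J : Int) - 1) + (K : Int) + (i : Int) * (K : Int)
        = ((K * J + i * K : Nat) : Int) := by push_cast; ring
    rw [this]; omega
  have hmul1 : K * J = J * K := Nat.mul_comm K J
  have hmul2 : (K - J) * K = K * K - J * K := Nat.sub_mul K J K
  have hmul3 : J * K ≤ K * K ∨ K ≤ J := by
    rcases le_or_gt J K with h | h
    · exact Or.inl (Nat.mul_le_mul_right _ h)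
    · exact Or.inr (by omega)
  have hmul4 : K ≤ J → (K - J) * K = 0 := by intro h; rw [Nat.sub_eq_zero_of_le h, Nat.zero_mul]
  have en : (max ((K : Int) * ((J : Int) - 1) + (K : Int) + 1
        + (if ((K : Int) - ((J : Int) - 1) - 1) > 0 then ((K : Int) - ((J : Int) - 1) - 1) * (K : Int) else 0))
        ((K : Int) * (K : Int) + 1)).toNat
      = max (K * J + (K - J) * K + 1) (K * K + 1) := by
    have eKK : (K : Int) * (K : Int) + 1 = ((K * K + 1 : Nat) : Int) := by push_cast; ring
    by_cases hJK : J < K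
    · rw [if_pos (by omega)]
      have h1 : (K : Int) * ((J : Int) - 1) + (K : Int) + 1 + ((K : Int) - ((J : Int) - 1) - 1) * (K : Int)
          = ((K * J + (K - J) * K + 1 : Nat) : Int) := by
        push_cast [Nat.cast_sub (le_of_lt hJK)]
        ring
      rw [h1, eKK, ← Nat.cast_max, Int.toNat_natCast]
    · rw [if_neg (by omega)]
      have h1 : (K : Int) * ((J : Int) - 1) + (K : Int) + 1 + 0
          = ((K * J + (K - J) * K + 1 : Nat) : Int) := by
        rw [hmul4 (by omega)]
        push_cast
        ring
      rw [h1, eKK, ← Nat.cast_max, Int.toNat_natCast]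
  have hsub : ∀ (a : List Int) (p : Nat) (x : Int),
      a.set p (a.getD p 0 - x) = a.set p (a.getD p 0 + (-x)) := by
    intro a p x; rw [sub_eq_add_neg]
  simp only [hp0, hp1, e2, e3, e5, en, binomRowB_spec, hsub]
  by_cases hJle : J ≤ K
  · rw [if_pos (show (0:Int) ≤ (K:Int) - ((J:Int) - 1) - 1 by omega)]
    have hmemA : ∀ x ∈ List.range (K - J + 1),
        (fun i : Nat => K * J + i * K) x
          < (List.replicate (max (K * J + (K - J) * K + 1) (K * K + 1)) (0:Int)).length := by
      intro x hx
      simp only [List.mem_range] at hx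
      simp only [List.length_replicate]
      have : x * K ≤ (K - J) * K := Nat.mul_le_mul_right K (by omega)
      omega
    have h1 := addFold (fun i : Nat => K * J + i * K)
      (fun i : Nat => (if PySem.Int.mod ((K : Int) - ((J : Int) - 1) - 1 - (i : Int)) 2 = 1 then -1 else 1) *
        ((List.range (K - J + 1)).map (fun i => (((K - J).choose i : Nat) : Int))).getD i 0)
      (List.range (K - J + 1))
      (List.replicate (max (K * J + (K - J) * K + 1) (K * K + 1)) 0) hmemA
    have hfold1 : (List.range (K - J + 1)).foldl
        (fun out i =>
          out.set (K * J + i * K)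
            (out.getD (K * J + i * K) 0 +
              (if PySem.Int.mod ((K : Int) - ((J : Int) - 1) - 1 - (i : Int)) 2 = 1 then -1 else 1) *
                ((List.range (K - J + 1)).map (fun i => (((K - J).choose i : Nat) : Int))).getD i 0))
        (List.replicate (max (K * J + (K - J) * K + 1) (K * K + 1)) 0)
        = (List.range (max (K * J + (K - J) * K + 1) (K * K + 1))).map
            (fun t => if K * J ≤ t then coefPow K (K - J) (t - K * J) else 0) := by
      apply listEqOfGetD
      · rw [h1.1]
        simp
      · intro t ht
        rw [h1.1, List.length_replicate] at ht
        rw [h1.2 t, getD_repl0, zero_add, getD_map_range _ _ _ ht]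
        have hcast : (K : Int) - ((J : Int) - 1) - 1 = ((K - J : Nat) : Int) := by
          push_cast [Nat.cast_sub hJle]
          ring
        have hc1 : ∀ i ∈ List.range (K - J + 1),
            (if K * J + i * K = t then
              (if PySem.Int.mod ((K : Int) - ((J : Int) - 1) - 1 - (i : Int)) 2 = 1 then -1 else 1) *
                ((List.range (K - J + 1)).map (fun i => (((K - J).choose i : Nat) : Int))).getD i 0 else 0)
            = (fun i => if K * J + i * K = t then
                (-1 : Int) ^ ((K - J) - i) * (((K - J).choose i : Nat) : Int) else 0) i := by
          intro i hi
          simp only [List.mem_range] at hi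
          rw [getD_map_range _ _ _ hi, hcast, signEq (K - J) i (by omega)]
        rw [List.map_congr_left hc1, placeSum K (K - J) (K * J) t hK]
    rw [hfold1]
    exact finishB K J hK _
  · rw [if_neg (show ¬ (0:Int) ≤ (K:Int) - ((J:Int) - 1) - 1 by omega)]
    have hKJ0 : K - J = 0 := Nat.sub_eq_zero_of_le (by omega)

    have hfold1 : (List.replicate (max (K * J + (K - J) * K + 1) (K * K + 1)) (0:Int)).set (K * J)
          ((List.replicate (max (K * J + (K - J) * K + 1) (K * K + 1)) (0:Int)).getD (K * J) 0 + 1)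
        = (List.range (max (K * J + (K - J) * K + 1) (K * K + 1))).map
            (fun t => if K * J ≤ t then coefPow K (K - J) (t - K * J) else 0) := by
      apply listEqOfGetD
      · simp
      · intro t ht
        simp only [List.length_set, List.length_replicate] at ht
        rw [getD_set, getD_repl0, getD_repl0, zero_add, getD_map_range _ _ _ ht]
        simp only [List.length_replicate]
        rw [hKJ0]
        by_cases he : t = K * J
        · subst he
          rw [if_pos ⟨rfl, by omega⟩, if_pos (le_refl _), Nat.sub_self, coefPow0 _ _ hK, if_pos rfl]
        · rw [if_neg (fun hh => he hh.1)]
          by_cases hle : K * J ≤ t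
          · rw [if_pos hle, coefPow0 _ _ hK, if_neg (by omega)]
          · rw [if_neg hle]
    rw [hfold1]
    exact finishB K J hK _


theorem k0case (j : Int) (hj1 : 0 ≤ j) : rho 0 j = rho_alt 0 j := by
  have e1 : ((0:Int) + 1).toNat = 1 := by omega
  have e2 : ((0:Int)).toNat = 0 := by omega
  have e3 : ((0:Int) - j - 1).toNat = 0 := by omega
  have e5 : ((0:Int) * j + 0).toNat = 0 := by rw [zero_mul]; omega
  have e4 : ((0:Int) * j + 0 + 1).toNat = 1 := by rw [zero_mul]; omega
  have hn1 : (max ((0:Int) * j + 0 + 1 + if (0:Int) - j - 1 > 0 then (0:Int) else 0) (0 + 1)).toNat = 1 := by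
    rw [if_neg (by omega)]
    have h : ((0:Int) * j + 0 + 1 + 0 : Int) = 1 := by ring
    rw [h]
    rfl
  simp only [rho, rho_alt, e1, e2, e3, e4, e5, List.range_zero, List.foldl_nil, mul_zero, Int.toNat_zero]
  rw [if_neg (by omega : ¬ (0:Int) ≤ 0 - j - 1)]
  simp only [hn1]
  have hset1 : ((List.replicate 1 (0:Int)).set 0 1) = [1] := rfl
  rw [hset1]
  have hm : mulPolys [1] [1] = [1] := by decide
  have hms : multScalar [1] (-1) = [-1] := by decide
  rw [hm, hms]
  have hap : addPolys [1] [-1] = [0] := by decide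
  rw [hap]
  have hstart : (List.replicate 1 (0:Int)).set 0 ((List.replicate 1 (0:Int)).getD 0 0 + 1) = [1] := by decide
  rw [hstart]
  have hfold : (List.range (0 + 1)).foldl
      (fun (out : List Int) (i : Nat) =>
        out.set 0 (out.getD 0 0 - (if PySem.Int.mod (0 - (i : Int)) 2 = 1 then -1 else 1) * (binomRowB 0).getD i 0))
      [1] = [0] := by decide
  rw [hfold]
  have hms0 : ∀ c : Int, multScalar [0] c = [0 * c] := fun c => rfl
  rw [hms0]
  simp

-- ===== VERDICT (by name: the statement is the Claim_ definition above) =====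
theorem rho_spec : Claim_equal_rho := by
  intro k j _ hpre
  unfold Spec_rho
  rcases hpre with ⟨hk, hj⟩ | ⟨rfl, hj⟩
  · obtain ⟨K, rfl⟩ : ∃ K : Nat, k = (K : Int) := ⟨k.toNat, by omega⟩
    obtain ⟨J, hJ⟩ : ∃ J : Nat, j = (J : Int) - 1 := ⟨(j + 1).toNat, by omega⟩
    subst hJ
    exact (rhoA_eq K J (by omega)).trans (rhoB_eq K J (by omega)).symm
  · by_cases hj2 : j = -2
    · subst hj2
      decide
    · by_cases hj3 : j = -1
      · subst hj3
        decide
      · exact k0case j (by omega)
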